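-- pv_equiv track=rewrite | github.com/Hassandav0319/AI-CRIME-ANALYTICS-SYSTEM | modules/vision.py | _threat_level
-- ===== SOURCE A (Python) =====
-- def _threat_level(detections: list) -> str:
--     if any(d["severity"] == "CRITICAL" for d in detections):
--         return "CRITICAL"
--     if any(d["severity"] == "HIGH" for d in detections):
--         return "HIGH"
--     if any(d["severity"] == "MEDIUM" for d in detections):
--         return "MEDIUM"
--     return "LOW"
-- ===== SOURCE B (Python) =====
-- def _threat_level(detections: list) -> str:
--     best = 0
--     for d in detections:
--         s = d["severity"]
--         if s == "CRITICAL":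
--             return "CRITICAL"
--         if s == "HIGH":
--             best = max(best, 2)
--         elif s == "MEDIUM":
--             best = max(best, 1)
--     return ["LOW", "MEDIUM", "HIGH"][best]
-- ===== Notes on version B (the rewrite author's own statement) =====
-- stated objective: alternative
-- what changed: Replaced A's three separate any-scans with a single pass that keeps a running best severity rank and maps it back to a name at the end (CRITICAL still returns immediately).
import Mathlib
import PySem

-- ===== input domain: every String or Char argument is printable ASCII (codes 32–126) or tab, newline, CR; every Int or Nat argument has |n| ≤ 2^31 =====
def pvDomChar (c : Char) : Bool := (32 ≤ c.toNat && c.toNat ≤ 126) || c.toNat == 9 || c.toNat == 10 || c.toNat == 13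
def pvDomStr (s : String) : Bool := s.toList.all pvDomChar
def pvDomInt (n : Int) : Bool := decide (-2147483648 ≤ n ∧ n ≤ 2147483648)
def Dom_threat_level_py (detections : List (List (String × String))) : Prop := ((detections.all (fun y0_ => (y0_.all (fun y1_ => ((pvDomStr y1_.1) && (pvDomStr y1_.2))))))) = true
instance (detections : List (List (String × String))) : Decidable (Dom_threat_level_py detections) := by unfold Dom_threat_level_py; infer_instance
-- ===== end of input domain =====

-- One honest line: B replaces A's three any-scans with one pass keeping a running best rank; objective: alternative decomposition.

-- ===== PORT A =====
-- d["severity"] is a first-match association-list lookup; on inputs admitted by Pre_ a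
-- missing key is never actually read by the Python, so totalizing with getD "" is exact there.
def pvSev (d : List (String × String)) : String := (d.lookup "severity").getD ""

def threat_level_py (detections : List (List (String × String))) : String :=
  if detections.any (fun d => pvSev d == "CRITICAL") then "CRITICAL"
  else if detections.any (fun d => pvSev d == "HIGH") then "HIGH"
  else if detections.any (fun d => pvSev d == "MEDIUM") then "MEDIUM"
  else "LOW"

-- ===== PORT B =====
def pvAltLoop : List (List (String × String)) → Nat → String
  | [], best => ["LOW", "MEDIUM", "HIGH"].getD best "LOW"
  | d :: rest, best =>
    let s := pvSev d
    if s == "CRITICAL" then "CRITICAL"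
    else if s == "HIGH" then pvAltLoop rest (max best 2)
    else if s == "MEDIUM" then pvAltLoop rest (max best 1)
    else pvAltLoop rest best

def threat_level_py_alt (detections : List (List (String × String))) : String :=
  pvAltLoop detections 0

-- ===== PRECONDITION & SPEC =====
-- Pre_ excludes exactly the inputs on which the Python A raises KeyError: a detection with
-- no "severity" key reached before any CRITICAL detection (B raises at the same point).
def Pre_threat_level_py (detections : List (List (String × String))) : Prop :=
  ∀ i < detections.length, (detections.getD i []).lookup "severity" = none →
    ∃ j < i, (detections.getD j []).lookup "severity" = some "CRITICAL"
instance (detections : List (List (String × String))) : Decidable (Pre_threat_level_py detections) := by unfold Pre_threat_level_py; infer_instance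

def pvWitness_threat_level_py : (List (List (String × String))) := [[("severity", "HIGH")], [("severity", "LOW")]]

def Spec_threat_level_py (detections : List (List (String × String))) (out : String) : Prop := out = threat_level_py_alt detections
instance (detections : List (List (String × String))) (out : String) : Decidable (Spec_threat_level_py detections out) := by unfold Spec_threat_level_py; infer_instance

-- ===== CLAIM (what is proved, stated in full; the proofs are below) =====
def Claim_equal_threat_level_py : Prop := ∀ (detections : List (List (String × String))), Dom_threat_level_py detections → Pre_threat_level_py detections → Spec_threat_level_py detections (threat_level_py detections)

-- ===== LEMMAS AND PROOFS =====

lemma pvAltLoop_eq (dets : List (List (String × String))) :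
    ∀ best : Nat, best ≤ 2 →
    pvAltLoop dets best =
      if dets.any (fun d => pvSev d == "CRITICAL") then "CRITICAL"
      else if dets.any (fun d => pvSev d == "HIGH") || decide (best = 2) then "HIGH"
      else if dets.any (fun d => pvSev d == "MEDIUM") || decide (best = 1) then "MEDIUM"
      else "LOW" := by
  induction dets with
  | nil =>
    intro best hb
    interval_cases best <;> simp [pvAltLoop]
  | cons d rest ih =>
    intro best hb
    simp only [pvAltLoop, List.any_cons]
    by_cases hc : pvSev d == "CRITICAL"
    · simp [hc]
    · by_cases hh : pvSev d == "HIGH"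
      · rw [if_neg (by simp [hc]), if_pos hh, ih (max best 2) (by omega)]
        simp [hc, hh, hb]
      · by_cases hm : pvSev d == "MEDIUM"
        · rw [if_neg (by simp [hc]), if_neg (by simp [hh]), if_pos hm,
            ih (max best 1) (by omega)]
          by_cases h2 : best = 2
          · have : max best 1 = 2 := by omega
            simp [hc, hh, hm, this, h2]
          · have : max best 1 = 1 := by omega
            simp [hc, hh, hm, this, h2]
        · rw [if_neg (by simp [hc]), if_neg (by simp [hh]), if_neg (by simp [hm]),
            ih best hb]
          simp [hc, hh, hm]

-- ===== VERDICT (by name: the statement is the Claim_ definition above) =====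
theorem threat_level_py_spec : Claim_equal_threat_level_py := by
  intro dets _ _
  unfold Spec_threat_level_py threat_level_py threat_level_py_alt
  rw [pvAltLoop_eq dets 0 (by omega)]
  simp
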